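-- pv_equiv track=rewrite | github.com/piter-a/K-means-K-medians-algorithm | K-means, K-medians algorithms.py | TP_FN
-- ===== SOURCE A (Python) =====
-- def TP_FN(a_pos, c_pos, f_pos, v_pos):
--     # True Positives
--     TP = 0
--     # False Negatives
--     FN = 0
--     #animals
--     for i in range(len(a_pos)):
--         for j in range(len(a_pos)):
--           # If i and j are not equal, and j >i
--             if (i != j & j>i):
--                 # If i=j then add 1 to TP
--                 if(a_pos[i] == a_pos[j]):
--                     TP += 1
--                     # els add 1 to FN
--                 else:
--                     FN += 1
--
--     #countries
--     for i in range(len(c_pos)):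
--         for j in range(len(c_pos)):
--             if (i != j & j>i):
--                 if(c_pos[i] == c_pos[j]):
--                     TP += 1
--                 else:
--                     FN += 1
--
--      #fruits
--     for i in range(len(f_pos)):
--         for j in range(len(f_pos)):
--             if (i != j & j>i):
--                 if(f_pos[i] == f_pos[j]):
--                     TP += 1
--                 else:
--                     FN += 1
--
--     #veggies
--     for i in range(len(v_pos)):
--         for j in range(len(v_pos)):
--             if (i != j & j>i):
--                 if(v_pos[i] == v_pos[j]):
--                     TP += 1
--                 else:
--                     FN += 1
--     return TP, FN
-- ===== SOURCE B (Python) =====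
-- def TP_FN(a_pos, c_pos, f_pos, v_pos):
--     # One linear pass per list with a running frequency dict: each element x
--     # pairs with counts[x] equal earlier elements (TP) and seen - counts[x]
--     # unequal earlier elements (FN).  O(n) instead of A's O(n^2) double loop.
--     tp = 0
--     fn = 0
--     for xs in (a_pos, c_pos, f_pos, v_pos):
--         counts = {}
--         seen = 0
--         for x in xs:
--             c = counts.get(x, 0)
--             tp += c
--             fn += seen - c
--             seen += 1
--             counts[x] = c + 1
--     return tp, fn
-- ===== Notes on version B (the rewrite author's own statement) =====
-- stated objective: faster
-- what changed: replaces the O(n^2) all-pairs double loop per list by a single pass that keeps a frequency dict of elements seen so far, adding counts[x] to TP and seen-counts[x] to FN at each element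
import Mathlib
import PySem

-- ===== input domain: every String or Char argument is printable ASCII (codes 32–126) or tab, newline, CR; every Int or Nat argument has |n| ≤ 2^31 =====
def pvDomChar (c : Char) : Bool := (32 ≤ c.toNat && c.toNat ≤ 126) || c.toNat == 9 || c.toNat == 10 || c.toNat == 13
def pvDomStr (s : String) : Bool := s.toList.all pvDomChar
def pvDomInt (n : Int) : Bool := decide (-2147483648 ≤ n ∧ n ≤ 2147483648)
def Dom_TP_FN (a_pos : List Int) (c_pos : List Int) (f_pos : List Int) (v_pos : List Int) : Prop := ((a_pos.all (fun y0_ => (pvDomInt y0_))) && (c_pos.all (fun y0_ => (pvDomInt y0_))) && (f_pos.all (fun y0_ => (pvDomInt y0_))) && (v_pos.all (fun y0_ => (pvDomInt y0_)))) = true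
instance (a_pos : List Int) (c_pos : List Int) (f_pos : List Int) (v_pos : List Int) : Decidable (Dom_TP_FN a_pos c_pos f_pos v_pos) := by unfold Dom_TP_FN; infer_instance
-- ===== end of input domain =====

-- B replaces A's O(n^2) all-pairs double loop per list by a single pass with a
-- running frequency dict (objective: faster, asymptotic).

-- ===== PORT A =====
-- A's identical nested-loop block, applied to each of the four lists in turn.
-- Python's 'i != j & j > i' parses as the chained comparison 'i != (j & j) > i'.
def pvLoopA (xs : List Int) (s : Int × Int) : Int × Int :=
  (PySem.List.pyRange 0 (PySem.List.len xs) 1).foldl (fun s i =>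
    (PySem.List.pyRange 0 (PySem.List.len xs) 1).foldl (fun s j =>
      if i ≠ PySem.Int.band j j ∧ PySem.Int.band j j > i then
        if PySem.List.pyGetD xs i 0 = PySem.List.pyGetD xs j 0 then (s.1 + 1, s.2)
        else (s.1, s.2 + 1)
      else s) s) s

def TP_FN (a_pos : List Int) (c_pos : List Int) (f_pos : List Int) (v_pos : List Int) : Int × Int :=
  pvLoopA v_pos (pvLoopA f_pos (pvLoopA c_pos (pvLoopA a_pos (0, 0))))

-- ===== PORT B =====
-- B's single pass over one list: state ((tp, fn), seen, counts).
def pvScanB (xs : List Int) (s : Int × Int) : Int × Int :=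
  (xs.foldl (fun (st : (Int × Int) × Int × PySem.Dict Int Int) x =>
      let c := st.2.2.getD x 0
      ((st.1.1 + c, st.1.2 + (st.2.1 - c)), st.2.1 + 1, st.2.2.insert x (c + 1)))
    (s, 0, PySem.Dict.empty)).1

def TP_FN_alt (a_pos : List Int) (c_pos : List Int) (f_pos : List Int) (v_pos : List Int) : Int × Int :=
  pvScanB v_pos (pvScanB f_pos (pvScanB c_pos (pvScanB a_pos (0, 0))))

-- ===== PRECONDITION & SPEC =====
def Spec_TP_FN (a_pos : List Int) (c_pos : List Int) (f_pos : List Int) (v_pos : List Int) (out : Int × Int) : Prop := out = TP_FN_alt a_pos c_pos f_pos v_pos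
instance (a_pos : List Int) (c_pos : List Int) (f_pos : List Int) (v_pos : List Int) (out : Int × Int) : Decidable (Spec_TP_FN a_pos c_pos f_pos v_pos out) := by unfold Spec_TP_FN; infer_instance

-- ===== CLAIM (what is proved, stated in full; the proofs are below) =====
def Claim_equal_TP_FN : Prop := ∀ (a_pos : List Int) (c_pos : List Int) (f_pos : List Int) (v_pos : List Int), Dom_TP_FN a_pos c_pos f_pos v_pos → Spec_TP_FN a_pos c_pos f_pos v_pos (TP_FN a_pos c_pos f_pos v_pos)

-- ===== LEMMAS AND PROOFS =====

-- canonical pair counts: equal / unequal (i, j)-pairs with i < j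
def tpA : List Int → Int
  | [] => 0
  | x :: t => (t.count x : Int) + tpA t

def fnA : List Int → Int
  | [] => 0
  | x :: t => ((t.length : Int) - (t.count x : Int)) + fnA t

theorem tpA_append_singleton (xs : List Int) (x : Int) :
    tpA (xs ++ [x]) = tpA xs + (xs.count x : Int) := by
  induction xs with
  | nil => simp [tpA]
  | cons y t ih =>
      simp only [List.cons_append, tpA, ih, List.count_append, List.count_cons, List.count_nil]
      rcases eq_or_ne x y with h | h
      · subst h; simp; ring
      · simp [h, Ne.symm h]; ring

theorem fnA_append_singleton (xs : List Int) (x : Int) :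
    fnA (xs ++ [x]) = fnA xs + ((xs.length : Int) - (xs.count x : Int)) := by
  induction xs with
  | nil => simp [fnA]
  | cons y t ih =>
      simp only [List.cons_append, fnA, ih, List.count_append, List.length_append,
        List.count_cons, List.count_nil, List.length_cons]
      rcases eq_or_ne x y with h | h
      · subst h; simp; ring
      · simp [h, Ne.symm h]; ring

-- B's inner loop, characterised by induction from the right
theorem scanB_go (xs : List Int) (s : Int × Int) :
    (xs.foldl (fun (st : (Int × Int) × Int × PySem.Dict Int Int) x =>
        let c := st.2.2.getD x 0
        ((st.1.1 + c, st.1.2 + (st.2.1 - c)), st.2.1 + 1, st.2.2.insert x (c + 1)))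
      (s, 0, PySem.Dict.empty))
    = ((s.1 + tpA xs, s.2 + fnA xs), (xs.length : Int), PySem.Dict.counter xs) := by
  induction xs using List.reverseRecOn with
  | nil => simp [tpA, fnA, PySem.Dict.counter]
  | append_singleton t x ih =>
      rw [List.foldl_append, ih]
      simp only [List.foldl_cons, List.foldl_nil]
      rw [show ((s.1 + tpA t, s.2 + fnA t), ((t.length : Int), PySem.Dict.counter t)).2.2.getD x 0
          = (t.count x : Int) from PySem.Dict.getD_counter t x]
      have hd : PySem.Dict.counter (t ++ [x]) = (PySem.Dict.counter t).insert x ((t.count x : Int) + 1) := by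
        rw [← PySem.Dict.foldl_insert_getD_add_one_eq_counter (t ++ [x]), List.foldl_append,
          PySem.Dict.foldl_insert_getD_add_one_eq_counter t]
        simp [PySem.Dict.getD_counter]
      rw [tpA_append_singleton, fnA_append_singleton, hd, List.length_append]
      push_cast
      ring_nf
      simp [add_comm]

theorem scanB_char (xs : List Int) (s : Int × Int) :
    pvScanB xs s = (s.1 + tpA xs, s.2 + fnA xs) := by
  unfold pvScanB; rw [scanB_go]

-- the (TP, FN) effect of scanning a list for pairs equal to a fixed value
theorem pairCountFold (l : List Int) (a : Int) (s : Int × Int) :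
    l.foldl (fun s y => if a = y then (s.1 + 1, s.2) else (s.1, s.2 + 1)) s
    = (s.1 + (l.count a : Int), s.2 + ((l.length : Int) - (l.count a : Int))) := by
  induction l generalizing s with
  | nil => simp
  | cons y t ih =>
      simp only [List.foldl_cons, List.count_cons, List.length_cons, ih]
      rcases eq_or_ne a y with h | h
      · subst h; simp; ring
      · simp [h, Ne.symm h]; ring

theorem sumTP (xs : List Int) :
    (((List.range xs.length).map
        (fun k => ((xs.drop (k + 1)).count (xs.getD k 0) : Int))).sum) = tpA xs := by
  induction xs with
  | nil => simp [tpA]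
  | cons x t ih =>
      rw [List.length_cons, List.range_succ_eq_map]
      simp only [List.map_cons, List.map_map, List.sum_cons]
      simp only [Function.comp_def, List.drop_succ_cons, List.getD_cons_succ,
        List.drop_zero, List.getD_cons_zero]
      rw [ih]; simp [tpA]

theorem sumFN (xs : List Int) :
    (((List.range xs.length).map
        (fun k => (((xs.drop (k + 1)).length : Int) - ((xs.drop (k + 1)).count (xs.getD k 0) : Int)))).sum) = fnA xs := by
  induction xs with
  | nil => simp [fnA]
  | cons x t ih =>
      rw [List.length_cons, List.range_succ_eq_map]
      simp only [List.map_cons, List.map_map, List.sum_cons]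
      simp only [Function.comp_def, List.drop_succ_cons, List.getD_cons_succ,
        List.drop_zero, List.getD_cons_zero]
      rw [ih]; simp [fnA]

theorem inner_char (xs : List Int) (i : Int) (hi : 0 ≤ i) (hin : i < (xs.length : Int)) (s : Int × Int) :
    (PySem.List.pyRange 0 (PySem.List.len xs) 1).foldl (fun s j =>
      if i ≠ PySem.Int.band j j ∧ PySem.Int.band j j > i then
        if PySem.List.pyGetD xs i 0 = PySem.List.pyGetD xs j 0 then (s.1 + 1, s.2)
        else (s.1, s.2 + 1)
      else s) s
    = (s.1 + ((xs.drop (i + 1).toNat).count (PySem.List.pyGetD xs i 0) : Int),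
       s.2 + (((xs.drop (i + 1).toNat).length : Int) - ((xs.drop (i + 1).toNat).count (PySem.List.pyGetD xs i 0) : Int))) := by
  rw [PySem.List.len_eq, PySem.List.pyRange_one_append 0 (i + 1) (xs.length : Int) (by omega) (by omega)]
  rw [List.foldl_append]
  rw [PySem.List.foldl_congr_mem (PySem.List.pyRange 0 (i + 1) 1) _ (fun s _ => s) s (by
    intro acc j hj
    rw [PySem.List.mem_pyRange_one] at hj
    simp only [PySem.Int.band_self]
    have : ¬ (i ≠ j ∧ j > i) := by omega
    rw [if_neg this])]
  rw [PySem.List.foldl_ignore]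
  rw [PySem.List.foldl_congr_mem (PySem.List.pyRange (i + 1) (xs.length : Int) 1) _
    (fun s j => if PySem.List.pyGetD xs i 0 = PySem.List.pyGetD xs j 0 then (s.1 + 1, s.2)
      else (s.1, s.2 + 1)) s (by
    intro acc j hj
    rw [PySem.List.mem_pyRange_one] at hj
    have h1 : i ≠ PySem.Int.band j j ∧ PySem.Int.band j j > i := by
      rw [PySem.Int.band_self]; omega
    rw [if_pos h1])]
  rw [PySem.List.foldl_pyRange_pyGetD' xs 0
    (fun s y => if PySem.List.pyGetD xs i 0 = y then (s.1 + 1, s.2) else (s.1, s.2 + 1)) s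
    (a := i + 1) (by omega)]
  rw [pairCountFold]

theorem loopA_char (xs : List Int) (s : Int × Int) :
    pvLoopA xs s = (s.1 + tpA xs, s.2 + fnA xs) := by
  unfold pvLoopA
  rw [PySem.List.len_eq]
  rw [PySem.List.foldl_congr_mem (PySem.List.pyRange 0 (xs.length : Int) 1) _
    (fun s i => (s.1 + ((xs.drop (i + 1).toNat).count (PySem.List.pyGetD xs i 0) : Int),
       s.2 + (((xs.drop (i + 1).toNat).length : Int) - ((xs.drop (i + 1).toNat).count (PySem.List.pyGetD xs i 0) : Int)))) s (by
    intro acc i hi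
    rw [PySem.List.mem_pyRange_one] at hi
    rw [← PySem.List.len_eq xs]
    exact inner_char xs i hi.1 (by exact_mod_cast hi.2) acc)]
  obtain ⟨s1, s2⟩ := s
  rw [PySem.List.foldl_prod_mk
    (f := fun a i => a + ((xs.drop (i + 1).toNat).count (PySem.List.pyGetD xs i 0) : Int))
    (g := fun a i => a + (((xs.drop (i + 1).toNat).length : Int) - ((xs.drop (i + 1).toNat).count (PySem.List.pyGetD xs i 0) : Int)))]
  rw [PySem.List.foldl_add, PySem.List.foldl_add]
  rw [PySem.List.pyRange_one, List.map_map, List.map_map]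
  have htn : ∀ k : Nat, ((0 + (k : Int)) + 1).toNat = k + 1 := by intro k; omega
  have hget : ∀ k : Nat, PySem.List.pyGetD xs (0 + (k : Int)) 0 = xs.getD k 0 := by
    intro k; rw [zero_add, PySem.List.pyGetD_natCast]
  have h0 : ((xs.length : Int) - 0).toNat = xs.length := by omega
  rw [h0]
  simp only [Prod.mk.injEq]
  constructor
  · rw [show ((fun i => ((xs.drop (i + 1).toNat).count (PySem.List.pyGetD xs i 0) : Int)) ∘ fun k : Nat => (0 : Int) + k)
        = fun k : Nat => ((xs.drop (k + 1)).count (xs.getD k 0) : Int) from by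
      funext k; simp only [Function.comp]; rw [htn k, hget k]]
    rw [sumTP]
  · rw [show ((fun i => (((xs.drop (i + 1).toNat).length : Int) - ((xs.drop (i + 1).toNat).count (PySem.List.pyGetD xs i 0) : Int))) ∘ fun k : Nat => (0 : Int) + k)
        = fun k : Nat => (((xs.drop (k + 1)).length : Int) - ((xs.drop (k + 1)).count (xs.getD k 0) : Int)) from by
      funext k; simp only [Function.comp]; rw [htn k, hget k]]
    rw [sumFN]

theorem char_eq (xs : List Int) (s : Int × Int) : pvLoopA xs s = pvScanB xs s := by
  rw [loopA_char, scanB_char]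

-- ===== VERDICT (by name: the statement is the Claim_ definition above) =====
theorem TP_FN_spec : Claim_equal_TP_FN := by
  intro a c f v _
  unfold Spec_TP_FN TP_FN TP_FN_alt
  rw [char_eq a, char_eq c, char_eq f, char_eq v]
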